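-- pv_equiv track=rewrite | github.com/DezSays/DigitalCraftsAugustFT | week08_BackEnd/python/Tuesday_Interview_Question.py | newArr
-- ===== SOURCE A (Python) =====
-- def newArr(numsList):
--     val = 0
--     newList = []
--     for i in numsList:
--         if i is not None:
--             newList.append(i)
--             val = i
--         else:
--             newList.append(val)
--     return newList
-- ===== SOURCE B (Python) =====
-- def newArr(numsList):
--     # run-length decomposition: zeros up to the first non-None anchor, then for
--     # each anchor emit its value replicated as one block up to the next anchor
--     n = len(numsList)
--     k = next((i for i, x in enumerate(numsList) if x is not None), n)
--     out = [0] * k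
--     i = k
--     while i < n:
--         v = numsList[i]
--         j = next((t for t in range(i + 1, n) if numsList[t] is not None), n)
--         out += [v] * (j - i)
--         i = j
--     return out
-- ===== Notes on version B (the rewrite author's own statement) =====
-- stated objective: alternative
-- what changed: Replaces the element-wise carry loop by a run-length decomposition: it finds the first non-None anchor, emits a zero block before it, then walks anchor to anchor emitting each value as one replicated block [v]*(j-i) instead of maintaining per-element state.
import Mathlib
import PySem

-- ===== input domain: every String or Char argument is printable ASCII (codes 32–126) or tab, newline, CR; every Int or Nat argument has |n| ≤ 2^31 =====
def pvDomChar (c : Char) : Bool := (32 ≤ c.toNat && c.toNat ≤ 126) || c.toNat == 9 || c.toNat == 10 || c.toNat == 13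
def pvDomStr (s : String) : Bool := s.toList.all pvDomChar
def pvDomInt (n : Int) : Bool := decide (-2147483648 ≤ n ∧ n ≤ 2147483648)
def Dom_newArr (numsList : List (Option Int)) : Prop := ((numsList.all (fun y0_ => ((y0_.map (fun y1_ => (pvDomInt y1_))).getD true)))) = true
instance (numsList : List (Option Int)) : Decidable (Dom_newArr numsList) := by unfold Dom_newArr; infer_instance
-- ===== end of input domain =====

-- B rebuilds the output by run-length decomposition (anchor indices + replicated blocks) instead of A's element-wise carry loop; alternative structure, same cost.

-- ===== PORT A =====
def newArr (numsList : List (Option Int)) : List Int :=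
  (numsList.foldl
    (fun (st : Int × List Int) i =>
      match i with
      | some v => (v, st.2 ++ [v])
      | none => (st.1, st.2 ++ [st.1]))
    (0, [])).2

-- ===== PORT B =====
-- the while loop of Source B; invariant at entry: i ≥ n or numsList[i] is not None,
-- so the `.getD 0` default for `v = numsList[i]` is never used
def pvRunsB (l : List (Option Int)) (i : Nat) (out : List Int) : List Int :=
  if h : i < l.length then
    let v := (l[i]'h).getD 0
    -- j = next((t for t in range(i+1, n) if numsList[t] is not None), n)
    let j := i + 1 + ((l.drop (i + 1)).findIdx (fun y => y.isSome))
    pvRunsB l j (out ++ List.replicate (j - i) v)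
  else out
termination_by l.length - i
decreasing_by omega

def newArr_alt (numsList : List (Option Int)) : List Int :=
  let k := numsList.findIdx (fun x => x.isSome)
  pvRunsB numsList k (List.replicate k 0)

-- ===== PRECONDITION & SPEC =====
def Spec_newArr (numsList : List (Option Int)) (out : List Int) : Prop := out = newArr_alt numsList
instance (numsList : List (Option Int)) (out : List Int) : Decidable (Spec_newArr numsList out) := by unfold Spec_newArr; infer_instance

-- ===== CLAIM (what is proved, stated in full; the proofs are below) =====
def Claim_equal_newArr : Prop := ∀ (numsList : List (Option Int)), Dom_newArr numsList → Spec_newArr numsList (newArr numsList)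

-- ===== LEMMAS AND PROOFS =====

-- reference forward-fill, used only by the proofs
def pvFill (val : Int) : List (Option Int) → List Int
  | [] => []
  | some v :: xs => v :: pvFill v xs
  | none :: xs => val :: pvFill val xs

theorem foldl_fill (xs : List (Option Int)) : ∀ (val : Int) (acc : List Int),
    (xs.foldl
      (fun (st : Int × List Int) i =>
        match i with
        | some v => (v, st.2 ++ [v])
        | none => (st.1, st.2 ++ [st.1]))
      (val, acc)).2 = acc ++ pvFill val xs := by
  induction xs with
  | nil => intro val acc; simp [pvFill]
  | cons x xs ih =>
    intro val acc
    cases x with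
    | some v => simp [List.foldl, pvFill, ih]
    | none => simp [List.foldl, pvFill, ih]

-- splitting the fill at the first non-None position; holds for every carry val
theorem fill_split (xs : List (Option Int)) : ∀ (val : Int),
    pvFill val xs
      = List.replicate (xs.findIdx (fun x => x.isSome)) val
        ++ pvFill 0 (xs.drop (xs.findIdx (fun x => x.isSome))) := by
  induction xs with
  | nil => intro val; simp [pvFill]
  | cons x xs ih =>
    intro val
    cases x with
    | none => simp [pvFill, List.findIdx_cons, ih val, List.replicate_succ]
    | some v => simp [pvFill, List.findIdx_cons]

theorem runs_fill (l : List (Option Int)) : ∀ (i : Nat) (out : List Int),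
    (∀ h : i < l.length, (l[i]'h).isSome) →
    pvRunsB l i out = out ++ pvFill 0 (l.drop i) := by
  intro i
  induction hw : l.length - i using Nat.strong_induction_on generalizing i with
  | _ n ih =>
    intro out hinv
    rw [pvRunsB]
    by_cases h : i < l.length
    · simp only [dif_pos h]
      obtain ⟨v, hv⟩ := Option.isSome_iff_exists.mp (hinv h)
      have hdrop : l.drop i = some v :: l.drop (i + 1) := by
        rw [List.drop_eq_getElem_cons h, hv]
      set k := (l.drop (i + 1)).findIdx (fun y => y.isSome) with hk
      have hlen : (l.drop (i + 1)).length = l.length - (i + 1) := List.length_drop ..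
      have hinv' : ∀ h' : i + 1 + k < l.length, (l[i + 1 + k]'h').isSome := by
        intro h'
        have hk' : k < (l.drop (i + 1)).length := by omega
        have := List.findIdx_getElem (w := hk') (p := fun y => y.isSome) (xs := l.drop (i + 1))
        simpa [List.getElem_drop, Nat.add_comm] using this
      have hrec := ih (l.length - (i + 1 + k)) (by omega) (i + 1 + k) rfl
        (out ++ List.replicate (i + 1 + k - i) ((some v).getD 0)) hinv'
      simp only [hv]
      rw [hrec]
      rw [hdrop, pvFill, fill_split (l.drop (i+1)) v, ← hk]
      have : l.drop (i + 1 + k) = (l.drop (i + 1)).drop k := by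
        simp [List.drop_drop]
      rw [this]
      have hji : i + 1 + k - i = k + 1 := by omega
      simp [hji, List.replicate_succ]
    · simp only [dif_neg h]
      have : l.drop i = [] := List.drop_eq_nil_of_le (by omega)
      simp [this, pvFill]

theorem newArr_spec : Claim_equal_newArr := by
  intro l _
  unfold Spec_newArr newArr newArr_alt
  rw [foldl_fill l 0 []]
  set k := l.findIdx (fun x => x.isSome) with hk
  have hinv : ∀ h : k < l.length, (l[k]'h).isSome := by
    intro h
    exact List.findIdx_getElem (w := h)
  rw [runs_fill l k (List.replicate k 0) hinv]
  simpa using (fill_split l 0)
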